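-- pv_equiv track=rewrite | github.com/yeseongcho/- | ICT 문제해결기법/PA2/PAseven.py | getting
-- ===== SOURCE A (Python) =====
-- def getting(locate_list, people_list, distance, k, Logic) :
--     index = len(people_list) - 1
--     Max = 0
--     if Logic == True :
--         for j in range(index, 0, -1) :
--             cum = people_list[j]
--             m = j-1
--             while(locate_list[j] - distance <= locate_list[m] + distance) :
--                 cum = cum + people_list[m]
--                 m = m-1
--                 if m == -1 :
--                     break
--             if cum > Max :
--                 Max = cum
--             if people_list[j-1] == people_list[k] :
--                 break
--
--     if Logic == False :
--         for j in range(index, 0, -1) :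
--             cum = people_list[j]
--             m = j-1
--             while(locate_list[j] - distance <= locate_list[m] + distance) :
--                 cum = cum + people_list[m]
--                 m = m-1
--                 if m == -1 :
--                     break
--             if cum > Max :
--                 Max = cum
--     return Max
-- ===== SOURCE B (Python) =====
-- def getting(locate_list, people_list, distance, k, Logic):
--     # prefix sums + per-window boundary index (last position breaking the
--     # distance condition), forward loops instead of A's backward walk
--     n = len(people_list)
--     pref = [0]
--     s = 0
--     for p in people_list:
--         s += p
--         pref.append(s)
--     lo = 1
--     if Logic and n >= 2:
--         t = people_list[k]
--         for i in range(n - 1):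
--             if people_list[i] == t:
--                 lo = i + 1
--     best = 0
--     for j in range(lo, n):
--         c = locate_list[j] - 2 * distance
--         b = -1
--         for m in range(j):
--             if locate_list[m] < c:
--                 b = m
--         cum = pref[j + 1] - pref[b + 1]
--         if cum > best:
--             best = cum
--     return best
-- ===== Notes on version B (the rewrite author's own statement) =====
-- stated objective: alternative
-- what changed: B replaces A's backward per-window walk-and-accumulate with a prefix-sum array plus a forward scan computing each window's left boundary index, and precomputes A's Logic early-break position once instead of re-checking it every iteration.
import Mathlib
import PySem

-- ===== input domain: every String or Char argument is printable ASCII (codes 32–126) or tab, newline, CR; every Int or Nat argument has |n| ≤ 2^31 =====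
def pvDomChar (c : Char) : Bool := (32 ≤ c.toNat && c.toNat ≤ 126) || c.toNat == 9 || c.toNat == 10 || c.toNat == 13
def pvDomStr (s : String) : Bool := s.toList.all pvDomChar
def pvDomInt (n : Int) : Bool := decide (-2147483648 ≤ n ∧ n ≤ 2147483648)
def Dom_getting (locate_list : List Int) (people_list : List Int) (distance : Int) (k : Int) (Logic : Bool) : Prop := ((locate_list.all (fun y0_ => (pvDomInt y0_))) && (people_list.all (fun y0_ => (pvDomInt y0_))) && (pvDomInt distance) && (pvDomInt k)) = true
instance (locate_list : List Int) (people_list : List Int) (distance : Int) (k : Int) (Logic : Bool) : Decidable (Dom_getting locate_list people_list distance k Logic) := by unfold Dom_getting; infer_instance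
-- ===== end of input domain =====

-- B replaces A's backward walk-and-accumulate with prefix sums plus a forward scan for
-- each window's left boundary, and precomputes the Logic early-break index once (objective: alternative).

-- ===== PORT A =====
-- the inner while loop: m counts down, breaking at m = -1 or when the distance condition fails
def gettingWhile (locate_list people_list : List Int) (Lj distance : Int) : Nat → Int → Int
  | m, cum =>
    if Lj - distance ≤ PySem.List.pyGetD locate_list (m : Int) 0 + distance then
      let cum' := cum + PySem.List.pyGetD people_list (m : Int) 0
      match m with
      | 0 => cum'
      | Nat.succ m' => gettingWhile locate_list people_list Lj distance m' cum'
    else cum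

-- one iteration body of A's for-loop (compute cum for index j ≥ 1)
def gettingBody (locate_list people_list : List Int) (distance : Int) (j : Nat) : Int :=
  gettingWhile locate_list people_list (PySem.List.pyGetD locate_list (j : Int) 0) distance
    (j - 1) (PySem.List.pyGetD people_list (j : Int) 0)

-- 'for j in range(index, 0, -1)' with the Logic==True break, as countdown recursion
def gettingLoopT (locate_list people_list : List Int) (distance k : Int) : Nat → Int → Int
  | 0, M => M
  | Nat.succ j, M =>
    let cum := gettingBody locate_list people_list distance (j + 1)
    let M' := if cum > M then cum else M
    if PySem.List.pyGetD people_list (j : Int) 0 = PySem.List.pyGetD people_list k 0 then M'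
    else gettingLoopT locate_list people_list distance k j M'

-- the same loop without the break (Logic==False branch)
def gettingLoopF (locate_list people_list : List Int) (distance : Int) : Nat → Int → Int
  | 0, M => M
  | Nat.succ j, M =>
    let cum := gettingBody locate_list people_list distance (j + 1)
    gettingLoopF locate_list people_list distance j (if cum > M then cum else M)

def getting (locate_list : List Int) (people_list : List Int) (distance : Int) (k : Int) (Logic : Bool) : Int :=
  let index := people_list.length - 1   -- range(index, 0, -1) is empty for index ≤ 0, so Nat subtraction is exact
  let M : Int := 0
  let M := if Logic = true then gettingLoopT locate_list people_list distance k index M else M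
  let M := if Logic = false then gettingLoopF locate_list people_list distance index M else M
  M

-- ===== PORT B =====
-- pref = [0]; s = 0; for p in people_list: s += p; pref.append(s)
def altPref (people_list : List Int) : List Int :=
  (people_list.foldl (fun (st : List Int × Int) p => (st.1 ++ [st.2 + p], st.2 + p)) ([0], 0)).1

-- lo = 1; if Logic and n >= 2: t = people_list[k]; for i in range(n-1): if people_list[i] == t: lo = i+1
def altLo (people_list : List Int) (k : Int) (n : Nat) (Logic : Bool) : Nat :=
  if Logic = true ∧ 2 ≤ n then
    (List.range (n - 1)).foldl
      (fun (lo i : Nat) => if PySem.List.pyGetD people_list (i : Int) 0 = PySem.List.pyGetD people_list k 0 then i + 1 else lo) 1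
  else 1

-- b = -1; for m in range(j): if locate_list[m] < c: b = m
def altBound (locate_list : List Int) (c : Int) (j : Nat) : Int :=
  (List.range j).foldl
    (fun (b : Int) (m : Nat) => if PySem.List.pyGetD locate_list (m : Int) 0 < c then (m : Int) else b) (-1)

def getting_alt (locate_list : List Int) (people_list : List Int) (distance : Int) (k : Int) (Logic : Bool) : Int :=
  let n := people_list.length
  let pref := altPref people_list
  let lo := altLo people_list k n Logic
  (List.range' lo (n - lo)).foldl
    (fun (best : Int) (j : Nat) =>
      let c := PySem.List.pyGetD locate_list (j : Int) 0 - 2 * distance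
      let b := altBound locate_list c j
      let cum := PySem.List.pyGetD pref ((j : Int) + 1) 0 - PySem.List.pyGetD pref (b + 1) 0
      if cum > best then cum else best) 0

-- ===== PRECONDITION & SPEC =====
-- Pre_ excludes exactly the inputs on which A raises IndexError: when the loop runs (≥ 2 people),
-- locate_list must cover every people index and, with Logic, k must be a valid (possibly negative) index.
def Pre_getting (locate_list : List Int) (people_list : List Int) (distance : Int) (k : Int) (Logic : Bool) : Prop :=
  2 ≤ people_list.length →
    (people_list.length ≤ locate_list.length ∧
      (Logic = true → PySem.Raise.InRange people_list.length k))
instance (locate_list : List Int) (people_list : List Int) (distance : Int) (k : Int) (Logic : Bool) : Decidable (Pre_getting locate_list people_list distance k Logic) := by unfold Pre_getting; infer_instance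

def pvWitness_getting : List Int × List Int × Int × Int × Bool := ([0, 2, 5], [1, 4, 2], 1, 0, true)

def Spec_getting (locate_list : List Int) (people_list : List Int) (distance : Int) (k : Int) (Logic : Bool) (out : Int) : Prop := out = getting_alt locate_list people_list distance k Logic
instance (locate_list : List Int) (people_list : List Int) (distance : Int) (k : Int) (Logic : Bool) (out : Int) : Decidable (Spec_getting locate_list people_list distance k Logic out) := by unfold Spec_getting; infer_instance

-- ===== CLAIM (what is proved, stated in full; the proofs are below) =====
def Claim_equal_getting : Prop := ∀ (locate_list : List Int) (people_list : List Int) (distance : Int) (k : Int) (Logic : Bool), Dom_getting locate_list people_list distance k Logic → Pre_getting locate_list people_list distance k Logic → Spec_getting locate_list people_list distance k Logic (getting locate_list people_list distance k Logic)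

-- ===== LEMMAS AND PROOFS =====

-- the if-step is max
theorem pvStepMax (c M : Int) : (if c > M then c else M) = max M c := by
  rw [max_def]; split_ifs <;> omega

theorem pvBound_lb (L : List Int) (c : Int) (j : Nat) : -1 ≤ altBound L c j ∧ altBound L c j < (j : Int) := by
  induction j with
  | zero => simp [altBound]
  | succ j ih =>
    unfold altBound at *
    rw [List.range_succ, List.foldl_append]
    simp only [List.foldl]
    split
    · omega
    · omega

theorem pvBound_succ (L : List Int) (c : Int) (j : Nat) :
    altBound L c (j + 1) = if PySem.List.pyGetD L (j : Int) 0 < c then (j : Int) else altBound L c j := by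
  unfold altBound
  rw [List.range_succ, List.foldl_append]
  simp

theorem pvWhile_eq (L P : List Int) (Lj d : Int) (m : Nat) (hm : m < P.length) (hmL : m < L.length) :
    ∀ acc : Int, gettingWhile L P Lj d m acc
      = acc + ((P.take (m + 1)).sum - (P.take ((altBound L (Lj - 2 * d) m.succ + 1).toNat)).sum) := by
  induction m with
  | zero =>
    intro acc
    unfold gettingWhile
    simp only [Nat.succ_eq_add_one, Nat.zero_add, pvBound_succ, Nat.cast_zero,
      PySem.List.pyGetD_zero, List.getD_eq_getElem?_getD, List.getElem?_eq_getElem hmL,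
      List.getElem?_eq_getElem hm, Option.getD_some]
    by_cases hcond : L[0] < Lj - 2 * d
    · rw [if_neg (by omega), if_pos hcond]
      simp
    · rw [if_pos (by omega), if_neg hcond]
      simp only [altBound, List.range_zero, List.foldl_nil]
      have h1 : (P.take 1).sum = (P.take 0).sum + P[0] := List.sum_take_succ P 0 hm
      simp at h1 ⊢
      omega
  | succ m' ih =>
    intro acc
    have hm'P : m' < P.length := by omega
    have hm'L : m' < L.length := by omega
    have hbsucc : altBound L (Lj - 2 * d) (m' + 1).succ
        = if L[m' + 1] < Lj - 2 * d then ((m' + 1 : Nat) : Int) else altBound L (Lj - 2 * d) (m' + 1) := by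
      rw [Nat.succ_eq_add_one, pvBound_succ]
      simp only [PySem.List.pyGetD_natCast, List.getD_eq_getElem?_getD,
        List.getElem?_eq_getElem hmL, Option.getD_some]
    unfold gettingWhile
    simp only [Nat.succ_eq_add_one, PySem.List.pyGetD_natCast,
      List.getD_eq_getElem?_getD, List.getElem?_eq_getElem hmL, List.getElem?_eq_getElem hm,
      Option.getD_some] at hbsucc ⊢
    by_cases hcond : L[m' + 1] < Lj - 2 * d
    · rw [if_neg (by omega), hbsucc, if_pos hcond]
      have : ((↑(m' + 1) : Int) + 1).toNat = m' + 2 := by omega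
      rw [this]
      simp
    · rw [if_pos (by omega), hbsucc, if_neg hcond]
      rw [ih hm'P hm'L]
      have hs : (P.take (m' + 1 + 1)).sum = (P.take (m' + 1)).sum + P[m' + 1] :=
        List.sum_take_succ P (m' + 1) hm
      rw [hs, Nat.succ_eq_add_one]
      ring

theorem pvPref_aux (P : List Int) : ∀ (acc : List Int) (s : Int),
    (P.foldl (fun (st : List Int × Int) p => (st.1 ++ [st.2 + p], st.2 + p)) (acc, s)).1
      = acc ++ (List.range P.length).map (fun i => s + (P.take (i + 1)).sum) := by
  induction P with
  | nil => intro acc s; simp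
  | cons p ps ih =>
    intro acc s
    simp only [List.foldl_cons]
    rw [ih]
    rw [List.length_cons, List.range_succ_eq_map]
    simp [List.map_map, Function.comp_def, List.take_succ_cons, add_assoc, Nat.succ_eq_add_one]

theorem pvPref_getD (P : List Int) (i : Nat) (hi : i ≤ P.length) :
    PySem.List.pyGetD (altPref P) (i : Int) 0 = (P.take i).sum := by
  rw [PySem.List.pyGetD_natCast]
  unfold altPref
  rw [pvPref_aux]
  cases i with
  | zero => simp
  | succ i' =>
    have hi' : i' < P.length := by omega
    simp only [List.singleton_append, List.getD_cons_succ]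
    simp only [List.getD_eq_getElem?_getD, List.getElem?_map, List.getElem?_range hi',
      Option.map_some, Option.getD_some]
    omega

theorem pvBody_eq (L P : List Int) (d : Int) (j : Nat) (h1 : 1 ≤ j) (h2 : j < P.length) (hL : P.length ≤ L.length) :
    gettingBody L P d j
      = PySem.List.pyGetD (altPref P) ((j : Int) + 1) 0
        - PySem.List.pyGetD (altPref P) (altBound L (PySem.List.pyGetD L (j : Int) 0 - 2 * d) j + 1) 0 := by
  have hjL : j < L.length := by omega
  have hb := pvBound_lb L (PySem.List.pyGetD L (j : Int) 0 - 2 * d) j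
  unfold gettingBody
  rw [pvWhile_eq L P (PySem.List.pyGetD L (j : Int) 0) d (j - 1) (by omega) (by omega)]
  have hsucc : (j - 1).succ = j := by omega
  rw [hsucc]
  -- rewrite B's two prefix lookups as take-sums
  have hpj : PySem.List.pyGetD (altPref P) ((j : Int) + 1) 0 = (P.take (j + 1)).sum := by
    rw [show ((j : Int) + 1) = ((j + 1 : Nat) : Int) by push_cast; ring]
    exact pvPref_getD P (j + 1) (by omega)
  set b := altBound L (PySem.List.pyGetD L (j : Int) 0 - 2 * d) j with hbdef
  have hpb : PySem.List.pyGetD (altPref P) (b + 1) 0 = (P.take ((b + 1).toNat)).sum := by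
    rw [show (b + 1) = (((b + 1).toNat : Nat) : Int) by omega]
    exact pvPref_getD P ((b + 1).toNat) (by omega)
  rw [hpj, hpb]
  have hj1 : j - 1 + 1 = j := by omega
  rw [hj1]
  have hs : (P.take (j + 1)).sum = (P.take j).sum + P[j] := List.sum_take_succ P j h2
  have hPj : PySem.List.pyGetD P (j : Int) 0 = P[j] := by
    simp [PySem.List.pyGetD_natCast, List.getD_eq_getElem?_getD, List.getElem?_eq_getElem h2]
  rw [hPj, hs]
  ring

-- swap: folding max after seeding with a equals seeding afterwards
theorem pvFoldSwap (g : Nat → Int) (l : List Nat) : ∀ (M a : Int),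
    l.foldl (fun M x => max M (g x)) (max M a) = max (l.foldl (fun M x => max M (g x)) M) a := by
  induction l with
  | nil => intro M a; rfl
  | cons x t ih =>
    intro M a
    simp only [List.foldl]
    rw [max_right_comm, ih]

theorem pvLoopF_eq (L P : List Int) (d : Int) (j : Nat) : ∀ M : Int,
    gettingLoopF L P d j M
      = (List.range' 1 j).foldl (fun M x => max M (gettingBody L P d x)) M := by
  induction j with
  | zero => intro M; rfl
  | succ j ih =>
    intro M
    show gettingLoopF L P d (j+1) M = _
    unfold gettingLoopF
    rw [ih, pvStepMax, List.range'_concat, List.foldl_append]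
    simp only [List.foldl]
    rw [pvFoldSwap]
    have h3 : 1 + 1 * j = j + 1 := by omega
    rw [h3]

-- loUpTo j : the fold of altLo restricted to range j
def pvLo (P : List Int) (k : Int) (j : Nat) : Nat :=
  (List.range j).foldl
    (fun (lo i : Nat) => if PySem.List.pyGetD P (i : Int) 0 = PySem.List.pyGetD P k 0 then i + 1 else lo) 1

theorem pvLo_bounds (P : List Int) (k : Int) (j : Nat) : 1 ≤ pvLo P k j ∧ pvLo P k j ≤ j + 1 := by
  induction j with
  | zero => simp [pvLo]
  | succ j ih =>
    unfold pvLo at *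
    rw [List.range_succ, List.foldl_append]
    simp only [List.foldl]
    split
    · omega
    · omega

theorem pvLo_succ (P : List Int) (k : Int) (j : Nat) :
    pvLo P k (j + 1) = if PySem.List.pyGetD P (j : Int) 0 = PySem.List.pyGetD P k 0 then j + 1 else pvLo P k j := by
  unfold pvLo
  rw [List.range_succ, List.foldl_append]
  simp

theorem pvLoopT_eq (L P : List Int) (d k : Int) (j : Nat) : ∀ M : Int,
    gettingLoopT L P d k j M
      = (List.range' (pvLo P k j) (j + 1 - pvLo P k j)).foldl (fun M x => max M (gettingBody L P d x)) M := by
  induction j with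
  | zero => intro M; simp [gettingLoopT, pvLo]
  | succ j ih =>
    intro M
    have hb := pvLo_bounds P k j
    show gettingLoopT L P d k (j+1) M = _
    unfold gettingLoopT
    simp only []
    rw [pvLo_succ, pvStepMax]
    by_cases hc : PySem.List.pyGetD P (j : Int) 0 = PySem.List.pyGetD P k 0 <;> simp only [hc, if_true, if_false, if_pos, if_neg, ite_true, ite_false]
    · have : j + 1 + 1 - (j + 1) = 1 := by omega
      rw [this]
      simp
    · rw [ih]
      have h1 : j + 1 + 1 - pvLo P k j = (j + 1 - pvLo P k j) + 1 := by omega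
      have h2 : pvLo P k j + (j + 1 - pvLo P k j) = j + 1 := by omega
      rw [h1, List.range'_concat, List.foldl_append]
      simp only [List.foldl, Nat.mul_one, h2]
      rw [pvFoldSwap]
      have h3 : pvLo P k j + 1 * (j + 1 - pvLo P k j) = j + 1 := by omega
      rw [h3]

theorem getting_spec : Claim_equal_getting := by
  intro L P d k Logic hdom hpre
  unfold Spec_getting
  by_cases hn : 2 ≤ P.length
  · obtain ⟨hL, hkk⟩ := hpre hn
    cases Logic with
    | false =>
      have hlo : altLo P k P.length false = 1 := by
        unfold altLo
        rw [if_neg (by simp)]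
      show getting L P d k false = getting_alt L P d k false
      unfold getting getting_alt
      simp only [hlo, Bool.false_eq_true, if_false, if_pos rfl, reduceIte]
      rw [pvLoopF_eq]
      apply PySem.List.foldl_congr_mem
      intro acc x hx
      rw [List.mem_range'_1] at hx
      rw [pvBody_eq L P d x hx.1 (by omega) hL, pvStepMax]
    | true =>
      have hlo : altLo P k P.length true = pvLo P k (P.length - 1) := by
        unfold altLo pvLo
        rw [if_pos ⟨rfl, hn⟩]
      have hb := pvLo_bounds P k (P.length - 1)
      show getting L P d k true = getting_alt L P d k true
      unfold getting getting_alt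
      simp only [hlo, Bool.true_eq_false, if_false, if_pos rfl, reduceIte]
      rw [pvLoopT_eq]
      have hcnt : P.length - 1 + 1 - pvLo P k (P.length - 1)
          = P.length - pvLo P k (P.length - 1) := by omega
      rw [hcnt]
      apply PySem.List.foldl_congr_mem
      intro acc x hx
      rw [List.mem_range'_1] at hx
      have hx1 : 1 ≤ x := by omega
      have hx2 : x < P.length := by omega
      rw [pvBody_eq L P d x hx1 hx2 hL, pvStepMax]
  · have h0 : P.length - 1 = 0 := by omega
    show getting L P d k Logic = getting_alt L P d k Logic
    unfold getting getting_alt altLo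
    cases Logic <;> simp [hn, h0, gettingLoopT, gettingLoopF]
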